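-- pv_equiv track=rewrite | github.com/Akumatic/Advent-of-Code | 2018/03/code.py | part1
-- ===== SOURCE A (Python) =====
-- def part1(vals : list):
--     data = {}
--     # get count for every field
--     for val in vals:
--         for field in val["fields"]:
--             f = str(field)
--             if f in data:
--                 data[f] += 1
--             else:
--                 data[f] = 1
--
--     # count fields with count higher than one
--     overlap = 0
--     for d in data:
--         if data[d] > 1:
--             overlap += 1
--
--     return overlap
-- ===== SOURCE B (Python) =====
-- def part1(vals : list):
--     # Sort-then-scan: sort all cell keys and count runs of length >= 2.
--     keys = sorted(str(field) for val in vals for field in val["fields"])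
--     overlap = 0
--     run = 1
--     prev = None
--     for k in keys:
--         if k == prev:
--             run += 1
--             if run == 2:
--                 overlap += 1
--         else:
--             run = 1
--         prev = k
--     return overlap
-- ===== Notes on version B (the rewrite author's own statement) =====
-- stated objective: alternative
-- what changed: Replaces the count dictionary plus a second tally pass with sort-then-scan: all str(field) keys are sorted and a single linear scan counts runs of equal keys of length at least two.
import Mathlib
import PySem

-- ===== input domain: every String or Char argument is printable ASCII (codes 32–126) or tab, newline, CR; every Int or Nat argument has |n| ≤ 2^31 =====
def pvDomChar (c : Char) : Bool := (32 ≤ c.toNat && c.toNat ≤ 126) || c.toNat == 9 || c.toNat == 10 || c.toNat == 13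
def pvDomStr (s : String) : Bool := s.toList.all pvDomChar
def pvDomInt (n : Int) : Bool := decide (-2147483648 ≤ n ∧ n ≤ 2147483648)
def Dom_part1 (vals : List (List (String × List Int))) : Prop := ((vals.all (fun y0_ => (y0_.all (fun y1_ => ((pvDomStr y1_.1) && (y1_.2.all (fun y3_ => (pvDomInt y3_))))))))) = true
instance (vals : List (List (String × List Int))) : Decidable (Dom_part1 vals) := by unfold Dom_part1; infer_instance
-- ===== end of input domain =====

-- B replaces A's count dict + second tally pass by sort-then-scan: sort all cell keys
-- and count runs of equal keys of length >= 2 in one linear scan (alternative algorithm).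


-- ===== PORT A =====
def part1 (vals : List (List (String × List Int))) : Int :=
  -- data = {}; for val in vals: for field in val["fields"]: f = str(field); count
  let data : PySem.Dict String Int :=
    vals.foldl (fun data val =>
      (((PySem.Dict.mk val).get? "fields").getD []).foldl (fun data field =>
        let f := PySem.Int.toStr field
        if data.contains f then data.insert f (data.getD f 0 + 1)
        else data.insert f 1) data) PySem.Dict.empty
  -- overlap = 0; for d in data: if data[d] > 1: overlap += 1
  data.keys.foldl (fun overlap d => if data.getD d 0 > 1 then overlap + 1 else overlap) 0

-- ===== PORT B =====
def part1_alt (vals : List (List (String × List Int))) : Int :=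
  -- keys = sorted(str(field) for val in vals for field in val["fields"])
  let keys := PySem.List.sorted
    (vals.flatMap (fun val => (((PySem.Dict.mk val).get? "fields").getD []).map PySem.Int.toStr))
    (fun x => x) false
  -- overlap = 0; run = 1; prev = None; for k in keys: …
  (keys.foldl (fun (st : Int × Int × Option String) k =>
      if some k == st.2.2 then
        let run := st.2.1 + 1
        ((if run == 2 then st.1 + 1 else st.1), run, some k)
      else (st.1, 1, some k)) ((0 : Int), (1 : Int), (none : Option String))).1

-- ===== PRECONDITION & SPEC =====
-- Pre_ excludes only inputs where val["fields"] raises KeyError (a claim dict without the key "fields"); A returns on all other inputs.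
def Pre_part1 (vals : List (List (String × List Int))) : Prop :=
  ∀ val ∈ vals, (PySem.Dict.mk val).contains "fields" = true
instance (vals : List (List (String × List Int))) : Decidable (Pre_part1 vals) := by unfold Pre_part1; infer_instance
def pvWitness_part1 : (List (List (String × List Int))) := [[("fields", [1, 2, 1])], [("fields", [2, 3])]]

def Spec_part1 (vals : List (List (String × List Int))) (out : Int) : Prop := out = part1_alt vals
instance (vals : List (List (String × List Int))) (out : Int) : Decidable (Spec_part1 vals out) := by unfold Spec_part1; infer_instance

-- ===== CLAIM (what is proved, stated in full; the proofs are below) =====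
def Claim_equal_part1 : Prop := ∀ (vals : List (List (String × List Int))), Dom_part1 vals → Pre_part1 vals → Spec_part1 vals (part1 vals)

-- ===== LEMMAS AND PROOFS =====

-- the flattened stream of cell keys str(field)
def pvFields (val : List (String × List Int)) : List String :=
  (((PySem.Dict.mk val).get? "fields").getD []).map PySem.Int.toStr

def pvStream (vals : List (List (String × List Int))) : List String :=
  vals.flatMap pvFields

-- A's dict is the Counter of the flattened stream; its second loop counts keys of count > 1
lemma part1_eq_counter (vals : List (List (String × List Int))) :
    part1 vals =
      ((PySem.Set.ofList (pvStream vals)).countP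
        (fun k => decide (1 < ((pvStream vals).count k : Int))) : Int) := by
  unfold part1
  have hstep : ∀ (d : PySem.Dict String Int) (val : List (String × List Int)),
      (((PySem.Dict.mk val).get? "fields").getD []).foldl (fun data field =>
        let f := PySem.Int.toStr field
        if data.contains f then data.insert f (data.getD f 0 + 1)
        else data.insert f 1) d
      = (pvFields val).foldl (fun d x => d.insert x (d.getD x 0 + 1)) d := by
    intro d val
    unfold pvFields
    rw [List.foldl_map]
    refine PySem.List.foldl_congr_mem _ _ _ _ (fun acc x _ => ?_)
    by_cases h : acc.contains (PySem.Int.toStr x)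
    · simp [h]
    · simp only [h, if_false, Bool.false_eq_true]
      rw [PySem.Dict.getD_of_not_contains _ _ (by simp [h]), zero_add]
  simp only [hstep]
  rw [show vals.foldl (fun d val => (pvFields val).foldl (fun (d : PySem.Dict String Int) x => d.insert x (d.getD x 0 + 1)) d) PySem.Dict.empty
      = (vals.flatMap pvFields).foldl (fun d x => d.insert x (d.getD x 0 + 1)) PySem.Dict.empty from List.foldl_flatMap.symm]
  rw [PySem.Dict.foldl_insert_getD_add_one_eq_counter]
  rw [PySem.List.foldl_ite_add_one (fun d => (PySem.Dict.counter (vals.flatMap pvFields)).getD d 0 > 1)]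
  rw [PySem.Dict.keys_counter]
  unfold pvStream
  simp only [PySem.Dict.getD_counter, zero_add]

-- B's loop body as a named step function
def pvStep (st : Int × Int × Option String) (k : String) : Int × Int × Option String :=
  if some k == st.2.2 then
    let run := st.2.1 + 1
    ((if run == 2 then st.1 + 1 else st.1), run, some k)
  else (st.1, 1, some k)

lemma part1_alt_eq_fold (vals : List (List (String × List Int))) :
    part1_alt vals =
      ((PySem.List.sorted (pvStream vals) (fun x => x) false).foldl pvStep
        ((0 : Int), (1 : Int), (none : Option String))).1 := by
  unfold part1_alt pvStream pvFields pvStep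
  rfl

-- number of distinct duplicated elements, by peeling the first element's occurrences
def dups : List String → Int
  | [] => 0
  | b :: t => (if b ∈ t then 1 else 0) + dups (t.filter (fun x => !(x == b)))
termination_by l => l.length
decreasing_by
  simp only [List.length_cons, List.length_unattach]
  exact Nat.lt_succ_of_le (le_trans (List.length_filter_le _ _) (by simp))

lemma dups_nil : dups [] = 0 := by rw [dups.eq_def]

lemma dups_cons (b : String) (t : List String) :
    dups (b :: t) = (if b ∈ t then 1 else 0) + dups (t.filter (fun x => !(x == b))) := by
  rw [dups.eq_def]

-- scan invariant: prev = b with a live run of length run ≥ 1, remaining input sorted and ≥ b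
lemma foldl_pvStep_aux (t : List String) : ∀ (b : String) (overlap run : Int),
    (b :: t).Pairwise (· ≤ ·) → 1 ≤ run →
    (t.foldl pvStep (overlap, run, some b)).1 =
      overlap + (if b ∈ t ∧ run = 1 then 1 else 0) + dups (t.filter (fun x => !(x == b))) := by
  induction t with
  | nil => intro b overlap run _ _; simp [dups_nil]
  | cons c t' ih =>
    intro b overlap run hp hrun
    by_cases hcb : c = b
    · subst hcb
      have hstep : pvStep (overlap, run, some c) c
          = ((if run + 1 == 2 then overlap + 1 else overlap), run + 1, some c) := by
        simp [pvStep]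
      have hp' : (c :: t').Pairwise (· ≤ ·) := by
        have h1 := (List.pairwise_cons.mp hp).1
        have h2 := (List.pairwise_cons.mp hp).2
        exact List.pairwise_cons.mpr ⟨fun x hx => h1 x (List.mem_cons_of_mem _ hx),
          (List.pairwise_cons.mp h2).2⟩
      rw [List.foldl_cons, hstep, ih c _ (run + 1) hp' (by omega)]
      have h1 : ¬ (run + 1 = 1) := by omega
      have hfe : (c :: t').filter (fun x => !(x == c)) = t'.filter (fun x => !(x == c)) := by
        simp
      rw [hfe]
      have hb2 : ((run + 1 : Int) == 2) = decide (run = 1) := by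
        by_cases h2 : run = 1
        · simp [h2]
        · simp [h2]; omega
      rw [hb2]
      by_cases h2 : run = 1 <;> simp [h2, h1]
    · have hstep : pvStep (overlap, run, some b) c = (overlap, 1, some c) := by
        simp [pvStep, hcb]
      have hble : ∀ x ∈ c :: t', b ≤ x := (List.pairwise_cons.mp hp).1
      have hp' : (c :: t').Pairwise (· ≤ ·) := (List.pairwise_cons.mp hp).2
      have hbnot : b ∉ c :: t' := by
        intro hb
        rcases List.mem_cons.mp hb with h | h
        · exact hcb h.symm
        · exact hcb (le_antisymm ((List.pairwise_cons.mp hp').1 b h)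
            (hble c List.mem_cons_self))
      rw [List.foldl_cons, hstep, ih c overlap 1 hp' le_rfl]
      have hbt' : b ∉ t' := fun h => hbnot (List.mem_cons_of_mem _ h)
      have hfb : (c :: t').filter (fun x => !(x == b)) = c :: t' := by
        refine List.filter_eq_self.mpr (fun x hx => ?_)
        simp only [Bool.not_eq_eq_eq_not, Bool.not_true, beq_eq_false_iff_ne]
        intro hxb; exact hbnot (hxb ▸ hx)
      rw [hfb]
      rw [dups_cons]
      simp only [hbnot, false_and, if_false, and_true]
      split_ifs <;> omega

lemma foldl_pvStep_eq_dups (s : List String) (hs : s.Pairwise (· ≤ ·)) :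
    (s.foldl pvStep ((0 : Int), (1 : Int), (none : Option String))).1 = dups s := by
  cases s with
  | nil => simp [dups_nil]
  | cons b t =>
    have hstep : pvStep (0, 1, none) b = (0, 1, some b) := by simp [pvStep]
    rw [List.foldl_cons, hstep, foldl_pvStep_aux t b 0 1 hs le_rfl, dups_cons]
    simp

-- dups counts the distinct elements of count ≥ 2 (any list)
lemma dups_eq_countP : ∀ (n : Nat) (l : List String), l.length ≤ n →
    dups l = (l.dedup.countP (fun x => decide (2 ≤ l.count x)) : Int) := by
  intro n
  induction n with
  | zero => intro l hl; rw [List.length_eq_zero_iff.mp (Nat.le_zero.mp hl)]; simp [dups_nil]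
  | succ n ih =>
    intro l hl
    cases l with
    | nil => simp [dups_nil]
    | cons b t =>
      have hlen : (t.filter (fun x => !(x == b))).length ≤ n :=
        le_trans (List.length_filter_le _ _) (by simpa using Nat.le_of_succ_le_succ hl)
      rw [dups_cons, ih _ hlen]
      set t0 := t.filter (fun x => !(x == b)) with ht0
      have hbt0 : b ∉ t0 := by simp [ht0]
      have hperm : (b :: t).dedup.Perm (b :: t0.dedup) := by
        refine (List.perm_ext_iff_of_nodup (List.nodup_dedup _) ?_).mpr (fun x => ?_)
        · exact List.nodup_cons.mpr ⟨fun h => hbt0 (List.mem_dedup.mp h), List.nodup_dedup _⟩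
        · simp only [List.mem_dedup, List.mem_cons, ht0, List.mem_filter,
            Bool.not_eq_eq_eq_not, Bool.not_true, beq_eq_false_iff_ne]
          constructor
          · rintro (h | h)
            · exact Or.inl h
            · by_cases hxb : x = b
              · exact Or.inl hxb
              · exact Or.inr ⟨h, hxb⟩
          · rintro (h | ⟨h, _⟩)
            · exact Or.inl h
            · exact Or.inr h
      rw [hperm.countP_eq, List.countP_cons]
      have hpb : decide (2 ≤ (b :: t).count b) = decide (b ∈ t) := by
        simp only [List.count_cons_self]
        by_cases h : b ∈ t
        · have := List.count_pos_iff.mpr h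
          simp only [h, decide_true, decide_eq_true_eq]; omega
        · have : t.count b = 0 := List.count_eq_zero.mpr h
          simp [h, this]
      have hcong : t0.dedup.countP (fun x => decide (2 ≤ (b :: t).count x))
          = t0.dedup.countP (fun x => decide (2 ≤ t0.count x)) := by
        refine List.countP_congr (fun x hx => ?_)
        have hxb : x ≠ b := by
          have := List.mem_dedup.mp hx
          rw [ht0, List.mem_filter] at this
          simpa using this.2
        have hc1 : (b :: t).count x = t.count x := by
          simp [Ne.symm hxb]
        have hc2 : t0.count x = t.count x := by
          rw [ht0, List.count_filter]
          simp [hxb]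
        rw [hc1, hc2]
      rw [hcong]
      by_cases h : b ∈ t
      · simp [h]; omega
      · simp [h]

-- ===== VERDICT (by name: the statement is the Claim_ definition above) =====
theorem part1_spec : Claim_equal_part1 := by
  intro vals _ _
  unfold Spec_part1
  rw [part1_eq_counter, part1_alt_eq_fold]
  set l := pvStream vals with hlp
  set s := PySem.List.sorted l (fun x => x) false with hs
  have hsp : s.Pairwise (· ≤ ·) := by
    have := PySem.List.sorted_pairwise (xs := l) (key := fun x => x)
    simpa [hs] using this
  have hperm : s.Perm l := PySem.List.sorted_perm l _ _
  rw [foldl_pvStep_eq_dups s hsp, dups_eq_countP s.length s le_rfl]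
  have h1 : (PySem.Set.ofList l).Nodup := PySem.Set.nodup_ofList l
  have h2 : s.dedup.Nodup := List.nodup_dedup s
  have hmem : ∀ x, x ∈ PySem.Set.ofList l ↔ x ∈ s.dedup := by
    intro x
    rw [PySem.Set.mem_ofList, List.mem_dedup, hperm.mem_iff]
  have hp : (PySem.Set.ofList l).Perm s.dedup :=
    (List.perm_ext_iff_of_nodup h1 h2).mpr hmem
  rw [hp.countP_eq]
  congr 1
  refine List.countP_congr (fun x _ => ?_)
  rw [hperm.count_eq]
  have hgoal : (1 < ((l.count x : Nat) : Int)) ↔ (2 ≤ l.count x) := by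
    constructor <;> intro h <;> omega
  simp only [decide_eq_true_eq]
  exact hgoal
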